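-- pv_equiv track=rewrite | github.com/lokosmotos/subtitle-ai-aligner | backend/srt_parser.py | validate_srt_content
-- ===== SOURCE A (Python) =====
-- def validate_srt_content(content):
--     """
--     Basic validation of SRT content
--     """
--     if not content or not content.strip():
--         return False, "Empty SRT content"
--
--     lines = content.strip().split('\n')
--
--     # Check for basic SRT structure
--     has_sequence = any(line.strip().isdigit() for line in lines)
--     has_timestamps = any('-->' in line for line in lines)
--
--     if not has_sequence or not has_timestamps:
--         return False, "Invalid SRT format - missing sequence numbers or timestamps"
--
--     return True, "Valid SRT content"
-- ===== SOURCE B (Python) =====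
-- def validate_srt_content(content):
--     """
--     Basic validation of SRT content
--     """
--     s = content.strip()
--     if not s:
--         return False, "Empty SRT content"
--
--     has_seq = False
--     has_ts = False
--     st = 0      # digit-line DFA: 0 = leading ws, 1 = digits, 2 = trailing ws, 3 = dead
--     dashes = 0  # length of the current run of '-', capped at 2
--     for ch in s:
--         if ch == '\n':
--             if st == 1 or st == 2:
--                 has_seq = True
--             st = 0
--             dashes = 0
--         else:
--             if ch.isdigit():
--                 st = 1 if st <= 1 else 3
--             elif ch.isspace():
--                 st = 2 if st == 1 or st == 2 else st
--             else:
--                 st = 3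
--             if ch == '-':
--                 dashes = min(dashes + 1, 2)
--             else:
--                 if ch == '>' and dashes == 2:
--                     has_ts = True
--                 dashes = 0
--     if st == 1 or st == 2:
--         has_seq = True
--
--     if not has_seq or not has_ts:
--         return False, "Invalid SRT format - missing sequence numbers or timestamps"
--     return True, "Valid SRT content"
-- ===== Notes on version B (the rewrite author's own statement) =====
-- stated objective: alternative
-- what changed: Replaces A's split-into-lines plus two independent any(...) scans (a per-line strip().isdigit() test and a per-line arrow-substring search) by a single character-level pass over the stripped content that runs a 4-state DFA recognising digit-only lines and a capped dash-run counter detecting the timestamp arrow, never materialising the line list.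
import Mathlib
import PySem

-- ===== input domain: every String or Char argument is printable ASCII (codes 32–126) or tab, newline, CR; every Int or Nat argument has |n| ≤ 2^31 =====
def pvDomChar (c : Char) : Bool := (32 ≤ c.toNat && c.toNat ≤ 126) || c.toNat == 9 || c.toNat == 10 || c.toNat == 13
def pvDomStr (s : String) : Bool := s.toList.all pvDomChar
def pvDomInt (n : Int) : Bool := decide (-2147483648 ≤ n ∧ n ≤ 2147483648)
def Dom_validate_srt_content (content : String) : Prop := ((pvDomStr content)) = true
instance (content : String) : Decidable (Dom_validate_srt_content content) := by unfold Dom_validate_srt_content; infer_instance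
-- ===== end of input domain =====

-- B replaces A's split-into-lines + two any(...) scans by a single character-level
-- state machine over the stripped content (a 4-state digit-line DFA plus a capped
-- dash-run counter detecting '-->'); same return values, different algorithm.

-- ===== PORT A =====
def validate_srt_content (content : String) : Bool × String :=
  if content = "" ∨ PySem.Str.strip content = "" then (false, "Empty SRT content")
  else
    let lines := (PySem.Str.split? (PySem.Str.strip content) "\n").getD []
    let has_sequence := List.any lines (fun line => PySem.Str.strIsdigit (PySem.Str.strip line))
    let has_timestamps := List.any lines (fun line => PySem.Str.isIn "-->" line)
    if !has_sequence || !has_timestamps then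
      (false, "Invalid SRT format - missing sequence numbers or timestamps")
    else (true, "Valid SRT content")

-- ===== PORT B =====
-- the per-character transitions of Source B's loop body
def srtStStep (st : Nat) (c : Char) : Nat :=
  if PySem.Chars.isdigit c then (if st ≤ 1 then 1 else 3)
  else if PySem.Chars.isspace c then (if st = 1 ∨ st = 2 then 2 else st)
  else 3

def srtDashStep (d : Nat) (c : Char) : Nat :=
  if c = '-' then min (d + 1) 2 else 0

def srtLineStep : (Bool × Bool × Nat × Nat) → Char → (Bool × Bool × Nat × Nat)
  | (hs, ht, st, d), c =>
    if c = '\n' then ((if st = 1 ∨ st = 2 then true else hs), ht, 0, 0)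
    else
      let st' := srtStStep st c
      let ht' := if c ≠ '-' ∧ c = '>' ∧ d = 2 then true else ht
      let d' := srtDashStep d c
      (hs, ht', st', d')

def validate_srt_content_alt (content : String) : Bool × String :=
  let s := PySem.Str.strip content
  if s = "" then (false, "Empty SRT content")
  else
    let r := s.toList.foldl srtLineStep (false, false, 0, 0)
    let has_seq := if r.2.2.1 = 1 ∨ r.2.2.1 = 2 then true else r.1
    if !has_seq || !r.2.1 then
      (false, "Invalid SRT format - missing sequence numbers or timestamps")
    else (true, "Valid SRT content")

-- ===== PRECONDITION & SPEC =====
def Spec_validate_srt_content (content : String) (out : Bool × String) : Prop := out = validate_srt_content_alt content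
instance (content : String) (out : Bool × String) : Decidable (Spec_validate_srt_content content out) := by unfold Spec_validate_srt_content; infer_instance

-- ===== CLAIM (what is proved, stated in full; the proofs are below) =====
def Claim_equal_validate_srt_content : Prop := ∀ (content : String), Dom_validate_srt_content content → Spec_validate_srt_content content (validate_srt_content content)

-- ===== LEMMAS AND PROOFS =====

-- per-line predicates of A, on the char-list side
def seqP (cs : List Char) : Bool := PySem.Chars.strIsdigit (PySem.Chars.strip cs)
def arrowP (cs : List Char) : Bool := PySem.Chars.isIn ['-', '-', '>'] cs

-- structural version of splitting on '\n'
def splitNL : List Char → List (List Char)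
  | [] => [[]]
  | a :: s =>
    match splitNL s with
    | [] => [[]]
    | h :: t => if a = '\n' then [] :: h :: t else (a :: h) :: t

theorem splitNL_ne_nil (s : List Char) : splitNL s ≠ [] := by
  cases s with
  | nil => simp [splitNL]
  | cons a s =>
    cases h : splitNL s with
    | nil => simp [splitNL, h]
    | cons hh tt =>
      simp only [splitNL, h]
      split <;> simp


theorem go_eq (fuel : Nat) (l cur : List Char) (acc : List (List Char)) (h : l.length ≤ fuel) :
    PySem.Chars.splitOn.go ['\n'] fuel l cur acc =
      acc.reverse ++ ((cur.reverse ++ (splitNL l).headI) :: (splitNL l).tail) := by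
  induction fuel generalizing l cur acc with
  | zero =>
    cases l with
    | nil => simp [PySem.Chars.splitOn.go, splitNL]
    | cons c rest => simp at h
  | succ fuel ih =>
    cases l with
    | nil => simp [PySem.Chars.splitOn.go, splitNL]
    | cons c rest =>
      simp only [PySem.Chars.splitOn.go]
      by_cases hc : c = '\n'
      · subst hc
        have hp : List.isPrefixOf ['\n'] ('\n' :: rest) = true := by
          simp [List.isPrefixOf]
        rw [if_pos hp]
        have hd : List.drop ['\n'].length ('\n' :: rest) = rest := rfl
        rw [hd]
        simp only [List.length_cons] at h
        rw [ih rest [] (cur.reverse :: acc) (by omega)]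
        cases hs : splitNL rest with
        | nil => exact absurd hs (splitNL_ne_nil rest)
        | cons hh tt =>
          simp [splitNL, hs]
      · have hp : List.isPrefixOf ['\n'] (c :: rest) = false := by
          simp [List.isPrefixOf]
          exact fun hcc => absurd hcc.symm hc
        rw [if_neg (by simp [hp])]
        simp only [List.length_cons] at h
        rw [ih rest (c :: cur) acc (by omega)]
        cases hs : splitNL rest with
        | nil => exact absurd hs (splitNL_ne_nil rest)
        | cons hh tt =>
          simp [splitNL, hs, hc]


theorem splitOn_nl (s : List Char) : PySem.Chars.splitOn s ['\n'] = splitNL s := by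
  show PySem.Chars.splitOn.go ['\n'] (s.length + 1) s [] [] = splitNL s
  rw [go_eq (s.length + 1) s [] [] (by omega)]
  cases hs : splitNL s with
  | nil => exact absurd hs (splitNL_ne_nil s)
  | cons hh tt => simp


theorem splitNL_concat (s : List Char) (a : Char) :
    splitNL (s ++ [a]) =
      if a = '\n' then splitNL s ++ [[]]
      else (splitNL s).dropLast ++ [(splitNL s).getLast! ++ [a]] := by
  induction s with
  | nil =>
    simp only [List.nil_append, splitNL]
    split <;> simp []
  | cons b s ih =>
    simp only [List.cons_append, splitNL, ih]
    cases hs : splitNL s with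
    | nil => exact absurd hs (splitNL_ne_nil s)
    | cons hh tt =>
      by_cases ha : a = '\n' <;> by_cases hb : b = '\n' <;>
        cases tt with
        | nil => simp [ha, hb]
        | cons t1 t2 => simp [ha, hb]


-- character classes
theorem isdigit_not_isspace (c : Char) (h : PySem.Chars.isdigit c = true) :
    PySem.Chars.isspace c = false := by
  simp only [PySem.Chars.isdigit, Bool.and_eq_true, decide_eq_true_eq, Char.le_def] at h
  have h48 : 48 ≤ c.toNat := h.1
  have h57 : c.toNat ≤ 57 := h.2
  simp only [PySem.Chars.isspace]
  simp only [Bool.or_eq_false_iff, Bool.and_eq_false_iff, decide_eq_false_iff_not]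
  omega


-- rstrip structure
theorem rstrip_cons_of_not_space (b : Char) (u : List Char) (hb : PySem.Chars.isspace b = false) :
    PySem.Chars.rstrip (b :: u) = b :: PySem.Chars.rstrip u := by
  simp only [PySem.Chars.rstrip, List.reverse_cons, List.dropWhile_append]
  by_cases he : (List.dropWhile PySem.Chars.isspace u.reverse).isEmpty
  · simp_all [List.dropWhile]
  · simp_all

theorem rstrip_of_no_space (l : List Char) (h : l.all (fun c => !PySem.Chars.isspace c) = true) :
    PySem.Chars.rstrip l = l := by
  simp only [PySem.Chars.rstrip]
  rw [List.dropWhile_eq_self_iff.mpr, List.reverse_reverse]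
  intro hlt
  have hm : l.reverse[0] ∈ l := by
    rw [List.getElem_reverse]
    exact List.getElem_mem _
  have := List.all_eq_true.mp h _ hm
  simp only [Bool.not_eq_eq_eq_not, Bool.not_true] at this
  simpa using this

theorem rstrip_append_all_space (x v : List Char) (hv : v.all PySem.Chars.isspace = true) :
    PySem.Chars.rstrip (x ++ v) = PySem.Chars.rstrip x := by
  simp only [PySem.Chars.rstrip, List.reverse_append, List.dropWhile_append]
  have hnil : List.dropWhile PySem.Chars.isspace v.reverse = [] := by
    rw [List.dropWhile_eq_nil_iff]
    intro c hc
    exact List.all_eq_true.mp hv c (by simpa using hc)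
  simp [hnil]

theorem rstrip_append_of_ne (x v : List Char) (hv : PySem.Chars.rstrip v ≠ []) :
    PySem.Chars.rstrip (x ++ v) = x ++ PySem.Chars.rstrip v := by
  simp only [PySem.Chars.rstrip, List.reverse_append, List.dropWhile_append] at *
  have hne : ¬ (List.dropWhile PySem.Chars.isspace v.reverse).isEmpty := by
    simpa [List.isEmpty_iff] using hv
  simp [hne]

theorem rstrip_prefix (v : List Char) : PySem.Chars.rstrip v <+: v := by
  have h : (PySem.Chars.rstrip v).reverse <:+ v.reverse := by
    simpa [PySem.Chars.rstrip] using List.dropWhile_suffix (l := v.reverse) PySem.Chars.isspace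
  exact List.reverse_suffix.mp h

theorem dropWhile_head_false (p : Char → Bool) (l u : List Char) (b : Char)
    (h : List.dropWhile p l = b :: u) : p b = false := by
  induction l with
  | nil => simp at h
  | cons a t ih =>
    rw [List.dropWhile_cons] at h
    by_cases hp : p a = true
    · exact ih (by simpa [hp] using h)
    · simp [hp] at h
      simp [← h.1, Bool.not_eq_true] at hp ⊢
      exact hp

-- digit-line DFA characterization
def stSpec (cs : List Char) : Nat :=
  match cs.dropWhile PySem.Chars.isspace with
  | [] => 0
  | b :: u' =>
    if PySem.Chars.isdigit b then
      let v := u'.dropWhile PySem.Chars.isdigit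
      if v = [] then 1 else if v.all PySem.Chars.isspace then 2 else 3
    else 3

theorem foldl_st_three (cs : List Char) : cs.foldl srtStStep 3 = 3 := by
  induction cs with
  | nil => rfl
  | cons a t ih =>
    have : srtStStep 3 a = 3 := by simp [srtStStep]
    simp [List.foldl_cons, this, ih]

theorem foldl_st_two (cs : List Char) :
    cs.foldl srtStStep 2 = if cs.all PySem.Chars.isspace then 2 else 3 := by
  induction cs with
  | nil => rfl
  | cons a t ih =>
    by_cases hd : PySem.Chars.isdigit a = true
    · have hsp := isdigit_not_isspace a hd
      simp [List.foldl_cons, srtStStep, hd, hsp, foldl_st_three]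
    · by_cases hs : PySem.Chars.isspace a = true
      · simp [List.foldl_cons, srtStStep, hd, hs, ih]
      · simp [List.foldl_cons, srtStStep, hd, hs, foldl_st_three]

theorem foldl_st_one (cs : List Char) :
    cs.foldl srtStStep 1 =
      (let v := cs.dropWhile PySem.Chars.isdigit
       if v = [] then 1 else if v.all PySem.Chars.isspace then 2 else 3) := by
  induction cs with
  | nil => rfl
  | cons a t ih =>
    by_cases hd : PySem.Chars.isdigit a = true
    · simp [List.foldl_cons, srtStStep, hd, ih]
    · by_cases hs : PySem.Chars.isspace a = true
      · simp [List.foldl_cons, srtStStep, hd, hs, foldl_st_two, List.all_cons]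
      · simp [List.foldl_cons, srtStStep, hd, hs, foldl_st_three, List.all_cons]

theorem foldl_st_zero (cs : List Char) : cs.foldl srtStStep 0 = stSpec cs := by
  induction cs with
  | nil => rfl
  | cons a t ih =>
    by_cases hd : PySem.Chars.isdigit a = true
    · have hsp := isdigit_not_isspace a hd
      simp [List.foldl_cons, srtStStep, hd, hsp, foldl_st_one, stSpec]
    · by_cases hs : PySem.Chars.isspace a = true
      · simpa [List.foldl_cons, srtStStep, hd, hs, stSpec, List.dropWhile_cons] using ih
      · simp [List.foldl_cons, srtStStep, hd, hs, foldl_st_three, stSpec]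

theorem digits_no_space (l : List Char) (h : l.all PySem.Chars.isdigit = true) :
    l.all (fun c => !PySem.Chars.isspace c) = true :=
  List.all_eq_true.mpr fun c hc => by
    simp [isdigit_not_isspace c (List.all_eq_true.mp h c hc)]

theorem stSpec_iff_seqP (cs : List Char) :
    (stSpec cs = 1 ∨ stSpec cs = 2) ↔ seqP cs = true := by
  unfold seqP PySem.Chars.strip PySem.Chars.lstrip
  cases hu : cs.dropWhile PySem.Chars.isspace with
  | nil => simp [stSpec, hu, PySem.Chars.rstrip, PySem.Chars.strIsdigit]
  | cons b u' =>
    have hbs : PySem.Chars.isspace b = false := dropWhile_head_false _ _ _ _ hu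
    by_cases hbd : PySem.Chars.isdigit b = true
    · have hsplit : u' = u'.takeWhile PySem.Chars.isdigit ++ u'.dropWhile PySem.Chars.isdigit :=
        (List.takeWhile_append_dropWhile).symm
      have hwall : (u'.takeWhile PySem.Chars.isdigit).all PySem.Chars.isdigit = true :=
        List.all_takeWhile
      by_cases hv0 : u'.dropWhile PySem.Chars.isdigit = []
      · have hu'w : u' = u'.takeWhile PySem.Chars.isdigit := by
          conv_lhs => rw [hsplit]
          rw [hv0, List.append_nil]
        have hall : (b :: u').all PySem.Chars.isdigit = true := by
          rw [List.all_cons, hbd]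
          rw [hu'w]
          simp [hwall]
        have hr : PySem.Chars.rstrip (b :: u') = b :: u' :=
          rstrip_of_no_space _ (digits_no_space _ hall)
        simp [stSpec, hu, hbd, hv0, hr, PySem.Chars.strIsdigit, hall]
      · by_cases hvs : (u'.dropWhile PySem.Chars.isdigit).all PySem.Chars.isspace = true
        · have hco : b :: u' = (b :: u'.takeWhile PySem.Chars.isdigit) ++ u'.dropWhile PySem.Chars.isdigit := by
            rw [List.cons_append]
            conv_lhs => rw [hsplit]
          have hr1 : PySem.Chars.rstrip (b :: u') = PySem.Chars.rstrip (b :: u'.takeWhile PySem.Chars.isdigit) := by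
            rw [hco, rstrip_append_all_space _ _ hvs]
          have hallw : (b :: u'.takeWhile PySem.Chars.isdigit).all PySem.Chars.isdigit = true := by
            rw [List.all_cons, hbd]; simp [hwall]
          have hr2 : PySem.Chars.rstrip (b :: u'.takeWhile PySem.Chars.isdigit) = b :: u'.takeWhile PySem.Chars.isdigit :=
            rstrip_of_no_space _ (digits_no_space _ hallw)
          simp [stSpec, hu, hbd, hv0, hvs, hr1, hr2, PySem.Chars.strIsdigit, hallw]
        · obtain ⟨c, v0, hv⟩ : ∃ c v0, u'.dropWhile PySem.Chars.isdigit = c :: v0 := by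
            cases hx : u'.dropWhile PySem.Chars.isdigit with
            | nil => exact absurd hx hv0
            | cons c v0 => exact ⟨c, v0, rfl⟩
          have hcd : PySem.Chars.isdigit c = false := dropWhile_head_false _ u' _ _ hv
          have hrvne : PySem.Chars.rstrip (c :: v0) ≠ [] := by
            intro hnil
            apply hvs
            rw [hv]
            have : List.dropWhile PySem.Chars.isspace (c :: v0).reverse = [] := by
              have := congrArg List.reverse hnil
              simpa [PySem.Chars.rstrip] using this
            rw [List.dropWhile_eq_nil_iff] at this
            exact List.all_eq_true.mpr fun x hx => this x (List.mem_reverse.mpr hx)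
          have hco : b :: u' = (b :: u'.takeWhile PySem.Chars.isdigit) ++ (c :: v0) := by
            rw [List.cons_append]
            conv_lhs => rw [hsplit, hv]
          have hr : PySem.Chars.rstrip (b :: u') =
              (b :: u'.takeWhile PySem.Chars.isdigit) ++ PySem.Chars.rstrip (c :: v0) := by
            rw [hco, rstrip_append_of_ne _ _ hrvne]
          obtain ⟨c', w', hrv⟩ : ∃ c' w', PySem.Chars.rstrip (c :: v0) = c' :: w' := by
            cases hx : PySem.Chars.rstrip (c :: v0) with
            | nil => exact absurd hx hrvne
            | cons c' w' => exact ⟨c', w', rfl⟩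
          have hc'c : c' = c := by
            have hp := rstrip_prefix (c :: v0)
            rw [hrv] at hp
            exact (List.cons_prefix_cons.mp hp).1
          have hfalse : ((b :: u'.takeWhile PySem.Chars.isdigit) ++ c' :: w').all PySem.Chars.isdigit = false := by
            rw [List.all_append]
            simp [hc'c, hcd]
          have hvs' : ¬ (PySem.Chars.isspace c = true ∧ ∀ x ∈ v0, PySem.Chars.isspace x = true) := by
            intro hx
            apply hvs
            rw [hv, List.all_cons, hx.1]
            simpa using List.all_eq_true.mpr hx.2
          simp [stSpec, hu, hbd, hvs', hr, hrv, PySem.Chars.strIsdigit, hv]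
          intro h
          rw [hc'c] at h
          simp [hcd] at h
    · have hrb : PySem.Chars.rstrip (b :: u') = b :: PySem.Chars.rstrip u' :=
        rstrip_cons_of_not_space b u' hbs
      simp [stSpec, hu, hbd, hrb, PySem.Chars.strIsdigit]

theorem st_iff_seqP (cs : List Char) :
    (cs.foldl srtStStep 0 = 1 ∨ cs.foldl srtStStep 0 = 2) ↔ seqP cs = true := by
  rw [foldl_st_zero]
  exact stSpec_iff_seqP cs

-- dash-run counter characterization
theorem foldl_dash (cs : List Char) :
    cs.foldl srtDashStep 0 =
      if ['-', '-'] <:+ cs then 2 else if ['-'] <:+ cs then 1 else 0 := by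
  induction cs using List.reverseRecOn with
  | nil => simp
  | append_singleton s c ih =>
    rw [List.foldl_append, List.foldl_cons, List.foldl_nil, ih]
    by_cases hc : c = '-'
    · subst hc
      have e1 : (['-', '-'] <:+ s ++ ['-']) ↔ ['-'] <:+ s := by
        constructor
        · rintro ⟨t, ht⟩
          have h2 : t ++ ['-'] = s := by
            have := congrArg List.dropLast ht
            simpa using this
          exact ⟨t, h2⟩
        · rintro ⟨t, ht⟩
          exact ⟨t, by rw [← ht]; simp⟩
      have e2 : ['-'] <:+ s ++ ['-'] := ⟨s, rfl⟩
      by_cases h2 : ['-', '-'] <:+ s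
      · have h1 : ['-'] <:+ s := List.IsSuffix.trans ⟨['-'], rfl⟩ h2
        simp [srtDashStep, e1, h1, h2]
      · by_cases h1 : ['-'] <:+ s
        · simp [srtDashStep, e1, h1, h2]
        · simp [srtDashStep, e1, e2, h1, h2]
    · have e1 : ¬ (['-', '-'] <:+ s ++ [c]) := by
        rintro ⟨t, ht⟩
        have := congrArg List.getLast? ht
        simp at this
        exact hc this.symm
      have e2 : ¬ (['-'] <:+ s ++ [c]) := by
        rintro ⟨t, ht⟩
        have := congrArg List.getLast? ht
        simp at this
        exact hc this.symm
      simp [srtDashStep, hc, e1, e2]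

theorem arrowP_concat (cs : List Char) (a : Char) :
    arrowP (cs ++ [a]) = (arrowP cs || (decide (a = '>') && decide (cs.foldl srtDashStep 0 = 2))) := by
  rw [foldl_dash]
  have hiff : (['-','-','>'] <:+: cs ++ [a]) ↔ (['-','-','>'] <:+: cs ∨ (a = '>' ∧ ['-','-'] <:+ cs)) := by
    constructor
    · rintro ⟨t, u, htu⟩
      cases u using List.reverseRecOn with
      | nil =>
        simp only [List.append_nil] at htu
        right
        have hlast := congrArg List.getLast? htu
        simp at hlast
        refine ⟨hlast.symm, ⟨t, ?_⟩⟩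
        have := congrArg List.dropLast htu
        simpa using this
      | append_singleton u' b _ =>
        left
        have hre : (t ++ ('-' :: '-' :: '>' :: u')) ++ [b] = cs ++ [a] := by
          simp only [List.cons_append, List.nil_append, List.append_assoc] at htu ⊢
          exact htu
        have hdl : t ++ '-' :: '-' :: '>' :: u' = cs := by
          have := congrArg List.dropLast hre
          rwa [List.dropLast_concat, List.dropLast_concat] at this
        exact ⟨t, u', by simpa using hdl⟩
    · rintro (⟨t, u, htu⟩ | ⟨ha, t, ht⟩)
      · exact ⟨t, u ++ [a], by rw [← htu]; simp⟩
      · subst ha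
        exact ⟨t, [], by rw [← ht]; simp⟩
  have b1 := PySem.Chars.isIn_iff_infix ['-','-','>'] (cs ++ [a])
  have b2 := PySem.Chars.isIn_iff_infix ['-','-','>'] cs
  simp only [arrowP]
  by_cases h2 : ['-','-','>'] <:+: cs
  · have hc2 : PySem.Chars.isIn ['-','-','>'] cs = true := b2.mpr h2
    have hc1 : PySem.Chars.isIn ['-','-','>'] (cs ++ [a]) = true := b1.mpr (hiff.mpr (Or.inl h2))
    simp [hc1, hc2]
  · have hc2 : PySem.Chars.isIn ['-','-','>'] cs = false :=
      Bool.eq_false_iff.mpr fun h => h2 (b2.mp h)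
    by_cases ha : a = '>' ∧ ['-','-'] <:+ cs
    · have hc1 : PySem.Chars.isIn ['-','-','>'] (cs ++ [a]) = true := b1.mpr (hiff.mpr (Or.inr ha))
      rw [hc1, hc2]
      simp [ha.1, ha.2]
    · have hc1 : PySem.Chars.isIn ['-','-','>'] (cs ++ [a]) = false :=
        Bool.eq_false_iff.mpr fun h => ha ((hiff.mp (b1.mp h)).resolve_left h2)
      rw [hc1, hc2]
      rw [not_and] at ha
      by_cases hgt : a = '>'
      · have hnd := ha hgt
        simp only [hgt, hnd, if_false, decide_true, Bool.true_and, Bool.false_or]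
        split_ifs <;> simp_all
      · simp [hgt]

-- the main loop invariant
theorem foldl_line_inv (s : List Char) (hs ht : Bool) :
    s.foldl srtLineStep (hs, ht, 0, 0) =
      (hs || ((splitNL s).dropLast.any seqP),
       ht || ((splitNL s).any arrowP),
       ((splitNL s).getLast (splitNL_ne_nil s)).foldl srtStStep 0,
       ((splitNL s).getLast (splitNL_ne_nil s)).foldl srtDashStep 0) := by
  induction s using List.reverseRecOn with
  | nil =>
    have ha0 : arrowP [] = false := by decide
    simp [splitNL, ha0]
  | append_singleton s a ih =>
    rw [List.foldl_append, List.foldl_cons, List.foldl_nil, ih]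
    have hP : splitNL s ≠ [] := splitNL_ne_nil s
    have hPsplit : (splitNL s).dropLast ++ [(splitNL s).getLast hP] = splitNL s :=
      List.dropLast_concat_getLast hP
    by_cases ha : a = '\n'
    · subst ha
      have hparts : splitNL (s ++ ['\n']) = splitNL s ++ [[]] := by
        rw [splitNL_concat]; simp
      have hgl : (splitNL (s ++ ['\n'])).getLast (splitNL_ne_nil _) = [] := by
        rw [List.getLast_congr _ _ hparts, List.getLast_concat]
        simp
      have hdl : (splitNL (s ++ ['\n'])).dropLast = splitNL s := by
        rw [hparts, List.dropLast_concat]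
      have hanyA : (splitNL (s ++ ['\n'])).any arrowP = (splitNL s).any arrowP := by
        rw [hparts, List.any_append]
        have : arrowP [] = false := by decide
        simp [this]
      have hanyS : (splitNL s).any seqP
          = ((splitNL s).dropLast.any seqP || seqP ((splitNL s).getLast hP)) := by
        conv_lhs => rw [← hPsplit]
        simp
      simp only [srtLineStep, hgl, hdl, hanyA, hanyS]
      by_cases hseq : seqP ((splitNL s).getLast hP) = true
      · have hst := (st_iff_seqP _).mpr hseq
        rcases hst with h1 | h1 <;> simp [h1, hseq]
      · have hst : ¬ (((splitNL s).getLast hP).foldl srtStStep 0 = 1 ∨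
            ((splitNL s).getLast hP).foldl srtStStep 0 = 2) :=
          fun h => hseq ((st_iff_seqP _).mp h)
        simp only [if_neg hst]
        simp [Bool.eq_false_iff.mpr hseq]
    · have hparts : splitNL (s ++ [a]) =
          (splitNL s).dropLast ++ [(splitNL s).getLast hP ++ [a]] := by
        rw [splitNL_concat, if_neg ha]
        congr 1
        · congr 1
          rw [List.getLast!_eq_getLast?_getD, List.getLast?_eq_some_getLast hP]
          rfl
      have hgl : (splitNL (s ++ [a])).getLast (splitNL_ne_nil _)
          = (splitNL s).getLast hP ++ [a] := by
        rw [List.getLast_congr _ _ hparts, List.getLast_concat]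
        simp
      have hdl : (splitNL (s ++ [a])).dropLast = (splitNL s).dropLast := by
        rw [hparts, List.dropLast_concat]
      have hanyA : (splitNL (s ++ [a])).any arrowP
          = ((splitNL s).dropLast.any arrowP || arrowP ((splitNL s).getLast hP ++ [a])) := by
        rw [hparts, List.any_append]
        simp
      have hanyA0 : (splitNL s).any arrowP
          = ((splitNL s).dropLast.any arrowP || arrowP ((splitNL s).getLast hP)) := by
        conv_lhs => rw [← hPsplit]
        simp
      simp only [srtLineStep, if_neg ha, hgl, hdl, hanyA, hanyA0, List.foldl_append,
        List.foldl_cons, List.foldl_nil, arrowP_concat]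
      by_cases hgt : a = '>' ∧ ((splitNL s).getLast hP).foldl srtDashStep 0 = 2
      · have hane : a ≠ '-' := by rw [hgt.1]; decide
        simp [hgt.1, hgt.2]
      · rw [if_neg (by rintro ⟨-, h1, h2⟩; exact hgt ⟨h1, h2⟩)]
        rw [not_and] at hgt
        by_cases h1 : a = '>'
        · have h2 := hgt h1
          simp [h1, h2]
        · simp [h1]

-- ===== VERDICT (by name: the statement is the Claim_ definition above) =====
set_option maxHeartbeats 1000000 in
theorem validate_srt_content_spec : Claim_equal_validate_srt_content := by
  intro content _
  unfold Spec_validate_srt_content validate_srt_content validate_srt_content_alt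
  by_cases hempty : PySem.Str.strip content = ""
  · simp [hempty]
  · have hne : ¬ (content = "" ∨ PySem.Str.strip content = "") := by
      rintro (h | h)
      · apply hempty; rw [h]; rfl
      · exact hempty h
    rw [if_neg hne]
    simp only [if_neg hempty]
    have hlines : (PySem.Str.split? (PySem.Str.strip content) "\n").getD []
        = List.map String.ofList (splitNL (PySem.Str.strip content).toList) := by
      have : ("\n" : String).toList = ['\n'] := by decide
      simp [PySem.Str.split?, PySem.Chars.split?, this, splitOn_nl]
    rw [hlines, List.any_map, List.any_map]
    have hpseq : ((fun line => PySem.Str.strIsdigit (PySem.Str.strip line)) ∘ String.ofList) = seqP := by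
      funext cs
      simp [Function.comp, PySem.Str.strIsdigit_eq, PySem.Str.toList_strip, seqP]
    have hparr : ((fun line => PySem.Str.isIn "-->" line) ∘ String.ofList) = arrowP := by
      funext cs
      have : ("-->" : String).toList = ['-','-','>'] := by decide
      simp [Function.comp, PySem.Str.isIn_eq, this, arrowP]
    rw [hpseq, hparr]
    rw [foldl_line_inv]
    set sl := (PySem.Str.strip content).toList with hsl
    have hP : splitNL sl ≠ [] := splitNL_ne_nil sl
    have hPsplit : (splitNL sl).dropLast ++ [(splitNL sl).getLast hP] = splitNL sl :=
      List.dropLast_concat_getLast hP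
    have hanyS : (splitNL sl).any seqP
        = ((splitNL sl).dropLast.any seqP || seqP ((splitNL sl).getLast hP)) := by
      conv_lhs => rw [← hPsplit]
      simp
    rw [hanyS]
    by_cases hseq : seqP ((splitNL sl).getLast hP) = true
    · have hst := (st_iff_seqP _).mpr hseq
      rcases hst with h1 | h1 <;> simp [h1, hseq]
    · have hst : ¬ (((splitNL sl).getLast hP).foldl srtStStep 0 = 1 ∨
          ((splitNL sl).getLast hP).foldl srtStStep 0 = 2) :=
        fun h => hseq ((st_iff_seqP _).mp h)
      simp only [if_neg hst]
      simp [Bool.eq_false_iff.mpr hseq]
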